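-- pv_equiv track=rewrite | github.com/leviespierre/eln-tracking-objects | graphic_interface.py | obj_height
-- ===== SOURCE A (Python) =====
-- def obj_height(size, pos):
-- 	smallest = 0
-- 	largest = 0
-- 	for i in range(size):
-- 		if pos[i][1] > largest:
-- 			largest = pos[i][1]
-- 		if pos[i][1] < smallest:
-- 			smallest = pos[i][1]
-- 	return largest-smallest
-- ===== SOURCE B (Python) =====
-- def obj_height(size, pos):
--     ys = sorted([pos[i][1] for i in range(size)] + [0])
--     return ys[-1] - ys[0]
-- ===== Notes on version B (the rewrite author's own statement) =====
-- stated objective: alternative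
-- what changed: Replaces the running (smallest, largest) accumulator loop with sort-then-endpoints: build the y-list plus the 0 baseline, sort it, and subtract the first element from the last.
import Mathlib
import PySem

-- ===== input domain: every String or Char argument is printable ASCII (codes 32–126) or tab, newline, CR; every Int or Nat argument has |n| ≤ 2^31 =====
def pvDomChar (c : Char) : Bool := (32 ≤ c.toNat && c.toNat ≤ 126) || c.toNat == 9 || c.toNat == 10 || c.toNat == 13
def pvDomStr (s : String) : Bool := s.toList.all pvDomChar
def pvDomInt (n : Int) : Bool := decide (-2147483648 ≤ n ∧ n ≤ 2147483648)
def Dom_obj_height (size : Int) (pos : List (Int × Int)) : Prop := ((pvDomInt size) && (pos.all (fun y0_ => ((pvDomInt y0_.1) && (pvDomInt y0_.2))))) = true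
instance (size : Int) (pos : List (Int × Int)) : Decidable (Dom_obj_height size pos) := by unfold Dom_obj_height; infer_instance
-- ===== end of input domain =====

-- B replaces A's running (smallest, largest) loop by sort-then-endpoints over the y-list with a 0 baseline (alternative algorithm); A raises IndexError when size > len(pos), excluded by Pre_.


-- ===== PORT A =====
-- loop 'for i in range(size)' with state (smallest, largest); pos[i] via pyGetD (in range under Pre_)
def obj_height (size : Int) (pos : List (Int × Int)) : Int :=
  let st := (PySem.List.pyRange 0 size 1).foldl
    (fun (st : Int × Int) i =>
      let y := (PySem.List.pyGetD pos i (0, 0)).2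
      let st := if y > st.2 then (st.1, y) else st
      let st := if y < st.1 then (y, st.2) else st
      st) (0, 0)
  st.2 - st.1

-- ===== PORT B =====
-- ys = sorted([pos[i][1] for i in range(size)] + [0]); ys[-1] - ys[0]  (ys is never empty, so the indexings are in range)
def obj_height_alt (size : Int) (pos : List (Int × Int)) : Int :=
  let ys := PySem.List.sorted
    (((PySem.List.pyRange 0 size 1).map (fun i => (PySem.List.pyGetD pos i (0, 0)).2)) ++ [0])
    (fun y => y) false
  PySem.List.pyGetD ys (-1) 0 - PySem.List.pyGetD ys 0 0

-- ===== PRECONDITION & SPEC =====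
-- A indexes pos[i] for every i < size, so it raises IndexError whenever size > len(pos)
def Pre_obj_height (size : Int) (pos : List (Int × Int)) : Prop := size ≤ (pos.length : Int)
instance (size : Int) (pos : List (Int × Int)) : Decidable (Pre_obj_height size pos) := by unfold Pre_obj_height; infer_instance
def pvWitness_obj_height : Int × (List (Int × Int)) := (2, [(0, 3), (0, -1)])

def Spec_obj_height (size : Int) (pos : List (Int × Int)) (out : Int) : Prop := out = obj_height_alt size pos
instance (size : Int) (pos : List (Int × Int)) (out : Int) : Decidable (Spec_obj_height size pos out) := by unfold Spec_obj_height; infer_instance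

-- ===== CLAIM (what is proved, stated in full; the proofs are below) =====
def Claim_equal_obj_height : Prop := ∀ (size : Int) (pos : List (Int × Int)), Dom_obj_height size pos → Pre_obj_height size pos → Spec_obj_height size pos (obj_height size pos)

-- ===== LEMMAS AND PROOFS =====

-- A's pair loop over a y-list computes (running min, running max)
theorem pair_fold (ys : List Int) (s l : Int) :
    ys.foldl
      (fun (st : Int × Int) y =>
        let st := if y > st.2 then (st.1, y) else st
        let st := if y < st.1 then (y, st.2) else st
        st) (s, l)
    = (ys.foldl min s, ys.foldl max l) := by
  induction ys generalizing s l with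
  | nil => rfl
  | cons y t ih =>
      simp only [List.foldl]
      have hstep : (if y < (if y > l then (s, y) else (s, l)).1
            then (y, (if y > l then (s, y) else (s, l)).2)
            else if y > l then (s, y) else (s, l)) = (min s y, max l y) := by
        split_ifs <;> simp only [Prod.mk.injEq, min_def, max_def] <;>
          split_ifs <;> omega
      rw [hstep]
      exact ih (min s y) (max l y)

theorem pair_fold_pairs (ps : List (Int × Int)) (s l : Int) :
    ps.foldl
      (fun (st : Int × Int) p =>
        let y := p.2
        let st := if y > st.2 then (st.1, y) else st
        let st := if y < st.1 then (y, st.2) else st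
        st) (s, l)
    = ((ps.map Prod.snd).foldl min s, (ps.map Prod.snd).foldl max l) := by
  have h := pair_fold (ps.map Prod.snd) s l
  rw [List.foldl_map] at h
  exact h

-- last element of a ≤-sorted list is an upper bound
theorem getLast_isMax (l : List Int) (hp : l.Pairwise (· ≤ ·)) (hne : l ≠ []) :
    ∀ y ∈ l, y ≤ l.getLast hne := by
  induction l with
  | nil => exact absurd rfl hne
  | cons x t ih =>
      intro y hy
      cases t with
      | nil => simp at hy; simp [hy]
      | cons z t' =>
          rw [List.getLast_cons (by simp)]
          rcases List.mem_cons.mp hy with h | h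
          · subst h
            have hx : y ≤ z := (List.pairwise_cons.mp hp).1 z (by simp)
            have hz := ih (List.pairwise_cons.mp hp).2 (by simp) z (by simp)
            omega
          · exact ih (List.pairwise_cons.mp hp).2 (by simp) y h

-- head of a ≤-sorted list is a lower bound (via key_head_sorted_le) gives: B's endpoints = running min / max
theorem sorted_head_eq_foldl_min (ys : List Int) :
    PySem.List.pyGetD (PySem.List.sorted (ys ++ [0]) (fun y => y) false) 0 0
      = ys.foldl min 0 := by
  set s := PySem.List.sorted (ys ++ [0]) (fun y => y) false with hs
  have hne : s ≠ [] := by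
    rw [hs]; rw [Ne, PySem.List.sorted_eq_nil_iff]; simp
  obtain ⟨m, t, hcons⟩ := List.exists_cons_of_ne_nil hne
  have hmin : PySem.List.min? ((0 : Int) :: ys) (fun y => y) = some (List.foldl min 0 ys) :=
    PySem.List.min?_id_cons 0 ys
  have hmem0 : ys.foldl min 0 ∈ (0 : Int) :: ys := PySem.List.min?_mem hmin
  have hlow := PySem.List.min?_isMin hmin
  have hperm : ((0 : Int) :: ys).Perm (ys ++ [0]) := by
    simpa using (List.perm_append_comm (l₁ := [(0 : Int)]) (l₂ := ys))
  have hmlow : ∀ y ∈ ys ++ [0], m ≤ y := by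
    have := PySem.List.key_head_sorted_le (xs := ys ++ [0]) (key := fun y => y)
      (m := m) (t := t) (by rw [← hs, hcons])
    simpa using this
  have hsp : s.Perm (ys ++ [0]) := by
    rw [hs]; exact PySem.List.sorted_perm _ _ _
  have hm_mem : m ∈ ys ++ [0] := by
    have hms : m ∈ s := by rw [hcons]; simp
    exact hsp.mem_iff.mp hms
  have h1 : m ≤ ys.foldl min 0 := hmlow _ (hperm.mem_iff.mp hmem0)
  have h2 : ys.foldl min 0 ≤ m := by
    have := hlow m (hperm.mem_iff.mpr hm_mem)
    simpa using this
  rw [hcons, PySem.List.pyGetD_zero_cons]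
  omega

theorem sorted_last_eq_foldl_max (ys : List Int) :
    PySem.List.pyGetD (PySem.List.sorted (ys ++ [0]) (fun y => y) false) (-1) 0
      = ys.foldl max 0 := by
  set s := PySem.List.sorted (ys ++ [0]) (fun y => y) false with hs
  have hne : s ≠ [] := by
    rw [hs]; rw [Ne, PySem.List.sorted_eq_nil_iff]; simp
  have hp : s.Pairwise (· ≤ ·) := by
    have := PySem.List.sorted_pairwise (xs := ys ++ [0]) (key := fun y => y)
    simpa [hs] using this
  have hmax : PySem.List.max? ((0 : Int) :: ys) (fun y => y) = some (List.foldl max 0 ys) :=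
    PySem.List.max?_id_cons 0 ys
  have hmem0 : ys.foldl max 0 ∈ (0 : Int) :: ys := PySem.List.max?_mem hmax
  have hhigh := PySem.List.max?_isMax hmax
  have hperm : ((0 : Int) :: ys).Perm (ys ++ [0]) := by
    simpa using (List.perm_append_comm (l₁ := [(0 : Int)]) (l₂ := ys))
  have hsp : s.Perm (ys ++ [0]) := by
    rw [hs]; exact PySem.List.sorted_perm _ _ _
  have hlast_mem : s.getLast hne ∈ ys ++ [0] := hsp.mem_iff.mp (List.getLast_mem hne)
  have h1 : ys.foldl max 0 ≤ s.getLast hne := by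
    have hmem : ys.foldl max 0 ∈ s :=
      hsp.mem_iff.mpr (hperm.mem_iff.mp hmem0)
    exact getLast_isMax s hp hne _ hmem
  have h2 : s.getLast hne ≤ ys.foldl max 0 := by
    have := hhigh (s.getLast hne) (hperm.mem_iff.mpr hlast_mem)
    simpa using this
  rw [PySem.List.pyGetD_neg_one s 0 hne]
  omega

-- ===== VERDICT (by name: the statement is the Claim_ definition above) =====
theorem obj_height_spec : Claim_equal_obj_height := by
  intro size pos _ hpre
  unfold Spec_obj_height obj_height obj_height_alt
  unfold Pre_obj_height at hpre
  by_cases hneg : size ≤ 0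
  · rw [PySem.List.pyRange_one_eq_nil hneg]
    simp only [List.map_nil, List.nil_append, List.foldl_nil]
    rfl
  · have hposz : 0 < size := by omega
    set n := size.toNat with hn
    have hnl : n ≤ pos.length := by omega
    have hlen : ((pos.take n).length : Int) = size := by
      simp [List.length_take]; omega
    -- both sides reduce to the y-list of the first n entries
    have hget : ∀ i ∈ PySem.List.pyRange 0 size 1,
        PySem.List.pyGetD pos i ((0 : Int), (0 : Int))
          = PySem.List.pyGetD (pos.take n) i ((0 : Int), (0 : Int)) := by
      intro i hi
      rw [PySem.List.mem_pyRange_one] at hi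
      have h0 : i = ((i.toNat : Nat) : Int) := by omega
      have hlt : i.toNat < n := by omega
      rw [h0, PySem.List.pyGetD_natCast, PySem.List.pyGetD_natCast]
      simp only [List.getD_eq_getElem?_getD, List.getElem?_take_of_lt hlt]
    -- A side: the pair fold
    have hA := PySem.List.foldl_pyRange_zero_pyGetD (xs := pos.take n) ((0 : Int), (0 : Int))
      (fun (st : Int × Int) (p : Int × Int) =>
        let y := p.2
        let st := if y > st.2 then (st.1, y) else st
        let st := if y < st.1 then (y, st.2) else st
        st) ((0 : Int), (0 : Int))
    rw [show PySem.List.len (pos.take n) = size by simpa [PySem.List.len] using hlen] at hA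
    have hfold : (PySem.List.pyRange 0 size 1).foldl
        (fun (st : Int × Int) i =>
          let y := (PySem.List.pyGetD pos i ((0 : Int), (0 : Int))).2
          let st := if y > st.2 then (st.1, y) else st
          let st := if y < st.1 then (y, st.2) else st
          st) ((0 : Int), (0 : Int))
        = (((pos.take n).map Prod.snd).foldl min 0, ((pos.take n).map Prod.snd).foldl max 0) := by
      rw [PySem.List.foldl_congr_mem (PySem.List.pyRange 0 size 1)
            (fun (st : Int × Int) i =>
              let y := (PySem.List.pyGetD pos i ((0 : Int), (0 : Int))).2
              let st := if y > st.2 then (st.1, y) else st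
              let st := if y < st.1 then (y, st.2) else st
              st)
            (fun (st : Int × Int) i =>
              let y := (PySem.List.pyGetD (pos.take n) i ((0 : Int), (0 : Int))).2
              let st := if y > st.2 then (st.1, y) else st
              let st := if y < st.1 then (y, st.2) else st
              st)
            ((0 : Int), (0 : Int))
            (fun acc i hi => by simp only [hget i hi])]
      rw [hA, pair_fold_pairs]
    -- B side: the mapped comprehension is that same y-list
    have hmap : (PySem.List.pyRange 0 size 1).map
        (fun i => (PySem.List.pyGetD pos i ((0 : Int), (0 : Int))).2)
        = (pos.take n).map Prod.snd := by
      have hcongr : (PySem.List.pyRange 0 size 1).map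
          (fun i => (PySem.List.pyGetD pos i ((0 : Int), (0 : Int))).2)
          = (PySem.List.pyRange 0 size 1).map
          (fun i => (PySem.List.pyGetD (pos.take n) i ((0 : Int), (0 : Int))).2) :=
        List.map_congr_left (fun i hi => by rw [hget i hi])
      rw [hcongr,
          show ((PySem.List.pyRange 0 size 1).map
            (fun i => (PySem.List.pyGetD (pos.take n) i ((0 : Int), (0 : Int))).2))
          = ((PySem.List.pyRange 0 size 1).map
            (fun i => PySem.List.pyGetD (pos.take n) i ((0 : Int), (0 : Int)))).map Prod.snd
          from (List.map_map ..).symm]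
      congr 1
      have := PySem.List.map_pyGetD_pyRange_zero (xs := pos.take n) ((0 : Int), (0 : Int))
      rw [show PySem.List.len (pos.take n) = size by simpa [PySem.List.len] using hlen] at this
      exact this
    simp only [hfold, hmap, sorted_head_eq_foldl_min, sorted_last_eq_foldl_max]
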